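-- pv_equiv track=rewrite | github.com/dan-strohschein/aria-c | transpile.py | _is_c_string_expr
-- ===== SOURCE A (Python) =====
-- def _is_c_string_expr(c_expr):
--     """Check if a translated C expression is a string type."""
--     c_expr = c_expr.strip()
--     if c_expr.startswith('aria_str_lit('):
--         return True
--     if c_expr.startswith('aria_str_concat('):
--         return True
--     if c_expr.startswith('aria_str_char_at('):
--         return True
--     if c_expr.startswith('aria_str_slice('):
--         return True
--     if c_expr.startswith('aria_str_from_'):
--         return True
--     if c_expr.startswith('aria_str_replace_all('):
--         return True
--     if c_expr.startswith('aria_str_trim_prefix('):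
--         return True
--     # Parenthesized string expr
--     if c_expr.startswith('(') and c_expr.endswith(')'):
--         return _is_c_string_expr(c_expr[1:-1])
--     return False
-- ===== SOURCE B (Python) =====
-- def _is_c_string_expr(c_expr):
--     """Check if a translated C expression is a string type."""
--     prefixes = ('aria_str_lit(', 'aria_str_concat(', 'aria_str_char_at(',
--                 'aria_str_slice(', 'aria_str_from_', 'aria_str_replace_all(',
--                 'aria_str_trim_prefix(')
--     while True:
--         c_expr = c_expr.strip()
--         if c_expr.startswith(prefixes):
--             return True
--         if c_expr.startswith('(') and c_expr.endswith(')'):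
--             c_expr = c_expr[1:-1]
--         else:
--             return False
-- ===== Notes on version B (the rewrite author's own statement) =====
-- stated objective: idiomatic
-- what changed: Replaces the seven-branch early-return chain and tail recursion with an iterative while-loop that tests one tuple of prefixes via a single startswith call and unwraps parentheses by reassignment.
import Mathlib
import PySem

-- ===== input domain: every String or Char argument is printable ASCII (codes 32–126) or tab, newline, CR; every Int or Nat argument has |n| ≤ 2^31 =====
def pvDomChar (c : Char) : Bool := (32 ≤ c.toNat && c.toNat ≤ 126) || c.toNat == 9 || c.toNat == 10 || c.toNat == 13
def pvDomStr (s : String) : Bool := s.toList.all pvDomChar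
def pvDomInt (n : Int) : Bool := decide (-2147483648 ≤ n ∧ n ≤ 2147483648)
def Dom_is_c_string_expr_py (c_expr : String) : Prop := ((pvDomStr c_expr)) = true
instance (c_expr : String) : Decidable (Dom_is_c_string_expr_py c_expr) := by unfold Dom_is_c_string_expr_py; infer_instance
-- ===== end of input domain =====

-- ===== PORT A =====
-- B replaces A's seven-branch early-return chain and tail recursion with a loop
-- testing one tuple of prefixes (idiomatic; same cost). Return-value equivalence only.

-- Helper cited by both ports' decreasing_by: strip never lengthens a string.
theorem pvStripLenLe (cs : List Char) : (PySem.Chars.strip cs).length ≤ cs.length := by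
  simp only [PySem.Chars.strip, PySem.Chars.rstrip, PySem.Chars.lstrip, List.length_reverse]
  calc (List.dropWhile PySem.Chars.isspace (List.dropWhile PySem.Chars.isspace cs).reverse).length
      ≤ (List.dropWhile PySem.Chars.isspace cs).reverse.length := List.length_dropWhile_le _ _
    _ ≤ cs.length := by simp [List.length_dropWhile_le]

-- Cited by both ports' decreasing_by: the recursive/loop argument shrinks.
theorem pvSliceLt (cs : List Char)
    (h : PySem.Chars.endswith (PySem.Chars.strip cs) (")".toList) = true) :
    (PySem.Chars.slice (PySem.Chars.strip cs) (some 1) (some (-1))).length < cs.length := by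
  have hne : (PySem.Chars.strip cs).length ≠ 0 := by
    intro h0
    rw [List.length_eq_zero_iff] at h0
    rw [PySem.Chars.endswith_iff, h0] at h
    simp [List.suffix_nil] at h
  have hle := pvStripLenLe cs
  have : PySem.Chars.slice (PySem.Chars.strip cs) (some 1) (some (-1))
      = PySem.List.slice (PySem.Chars.strip cs) (some 1) (some (-1)) := by
    simp [PySem.Chars.slice_eq_listSlice]
  rw [this, PySem.List.length_slice]
  simp only [PySem.List.clampIdx_neg_one]
  omega

def is_c_string_expr_chars (c_expr : List Char) : Bool :=
  let s := PySem.Chars.strip c_expr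
  if PySem.Chars.startswith s ("aria_str_lit(".toList) then true
  else if PySem.Chars.startswith s ("aria_str_concat(".toList) then true
  else if PySem.Chars.startswith s ("aria_str_char_at(".toList) then true
  else if PySem.Chars.startswith s ("aria_str_slice(".toList) then true
  else if PySem.Chars.startswith s ("aria_str_from_".toList) then true
  else if PySem.Chars.startswith s ("aria_str_replace_all(".toList) then true
  else if PySem.Chars.startswith s ("aria_str_trim_prefix(".toList) then true
  else if PySem.Chars.startswith s ("(".toList) && PySem.Chars.endswith s (")".toList) then
    is_c_string_expr_chars (PySem.Chars.slice s (some 1) (some (-1)))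
  else false
termination_by c_expr.length
decreasing_by
  rename_i hb
  exact pvSliceLt c_expr (by simpa using (Bool.and_eq_true .. |>.mp hb).2)

def is_c_string_expr_py (c_expr : String) : Bool :=
  is_c_string_expr_chars c_expr.toList

-- ===== PORT B =====
def ariaStrPrefixes : List (List Char) :=
  ["aria_str_lit(".toList, "aria_str_concat(".toList, "aria_str_char_at(".toList,
   "aria_str_slice(".toList, "aria_str_from_".toList, "aria_str_replace_all(".toList,
   "aria_str_trim_prefix(".toList]

-- the `while True` loop of Source B, state = current c_expr
def is_c_string_expr_loop (c_expr : List Char) : Bool :=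
  let s := PySem.Chars.strip c_expr
  if ariaStrPrefixes.any (fun p => PySem.Chars.startswith s p) then true
  else if PySem.Chars.startswith s ("(".toList) && PySem.Chars.endswith s (")".toList) then
    is_c_string_expr_loop (PySem.Chars.slice s (some 1) (some (-1)))
  else false
termination_by c_expr.length
decreasing_by
  rename_i hb
  exact pvSliceLt c_expr (by simpa using (Bool.and_eq_true .. |>.mp hb).2)

def is_c_string_expr_py_alt (c_expr : String) : Bool :=
  is_c_string_expr_loop c_expr.toList

-- ===== PRECONDITION & SPEC =====
def Spec_is_c_string_expr_py (c_expr : String) (out : Bool) : Prop := out = is_c_string_expr_py_alt c_expr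
instance (c_expr : String) (out : Bool) : Decidable (Spec_is_c_string_expr_py c_expr out) := by unfold Spec_is_c_string_expr_py; infer_instance

-- ===== CLAIM (what is proved, stated in full; the proofs are below) =====
def Claim_equal_is_c_string_expr_py : Prop := ∀ (c_expr : String), Dom_is_c_string_expr_py c_expr → Spec_is_c_string_expr_py c_expr (is_c_string_expr_py c_expr)

-- ===== LEMMAS AND PROOFS =====

theorem pvCharsEq : ∀ (n : Nat) (cs : List Char), cs.length ≤ n →
    is_c_string_expr_chars cs = is_c_string_expr_loop cs := by
  intro n
  induction n with
  | zero =>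
    intro cs h
    have : cs = [] := List.length_eq_zero_iff.mp (Nat.le_zero.mp h)
    subst this
    rw [is_c_string_expr_chars, is_c_string_expr_loop]
    simp [ariaStrPrefixes, PySem.Chars.strip, PySem.Chars.rstrip, PySem.Chars.lstrip,
      PySem.Chars.startswith, List.isPrefixOf]
  | succ n ih =>
    intro cs h
    rw [is_c_string_expr_chars, is_c_string_expr_loop]
    simp only [ariaStrPrefixes, List.any_cons, List.any_nil, Bool.or_false]
    by_cases hp : PySem.Chars.startswith (PySem.Chars.strip cs) ("(".toList) = true
      ∧ PySem.Chars.endswith (PySem.Chars.strip cs) (")".toList) = true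
    · have hr := ih (PySem.Chars.slice (PySem.Chars.strip cs) (some 1) (some (-1)))
        (by have := pvSliceLt cs hp.2; omega)
      split_ifs <;> simp_all
    · split_ifs <;> simp_all

-- ===== VERDICT (by name: the statement is the Claim_ definition above) =====
theorem is_c_string_expr_py_spec : Claim_equal_is_c_string_expr_py := by
  intro c_expr _
  unfold Spec_is_c_string_expr_py is_c_string_expr_py is_c_string_expr_py_alt
  exact pvCharsEq c_expr.toList.length c_expr.toList le_rfl
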